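-- pv_equiv track=rewrite | github.com/ultimatech-cn/runpod-comfyui-serverless-zimage0410 | comfyui-dependency-inventory/scripts/write_runpod_outputs.py | build_custom_nodes_manifest
-- ===== SOURCE A (Python) =====
-- from typing import Any, Dict, List
--
-- def build_custom_nodes_manifest(custom_nodes: List[Dict[str, Any]]) -> str:
--     lines = [
--         "# Auto-generated draft. Review unresolved items before delivery.",
--         "# Supported formats:",
--         "#   registry:<node-name>",
--         "#   git:<repo-url>",
--         "#   git:<repo-url>|<branch>",
--     ]
--     seen_specs = set()
--     seen_todos = set()
--     for node in custom_nodes: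
--         install_spec = node.get("install_spec", "")
--         version_hint = node.get("version_hint", "")
--         if install_spec:
--             line = install_spec
--             if version_hint:
--                 line = f"{line}|{version_hint}"
--             if line not in seen_specs:
--                 seen_specs.add(line)
--                 lines.append(line)
--         else:
--             todo = f"# TODO unresolved custom node: {node['node_name']}"
--             if todo not in seen_todos:
--                 seen_todos.add(todo)
--                 lines.append(todo)
--     return "\n".join(lines) + "\n"
-- ===== SOURCE B (Python) =====
-- def build_custom_nodes_manifest(custom_nodes):
--     header = [
--         "# Auto-generated draft. Review unresolved items before delivery.",
--         "# Supported formats:",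
--         "#   registry:<node-name>",
--         "#   git:<repo-url>",
--         "#   git:<repo-url>|<branch>",
--     ]
--
--     def candidate(node):
--         spec = node.get("install_spec", "")
--         if spec:
--             hint = node.get("version_hint", "")
--             return (True, f"{spec}|{hint}" if hint else spec)
--         return (False, f"# TODO unresolved custom node: {node['node_name']}")
--
--     cands = [candidate(node) for node in custom_nodes]
--     body = []
--     # select-and-remove: emit the head candidate, delete all its later copies
--     while cands:
--         head = cands[0]
--         body.append(head[1])
--         cands = [c for c in cands[1:] if c != head]
--     return "\n".join(header + body) + "\n"
-- ===== Notes on version B (the rewrite author's own statement) =====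
-- stated objective: alternative
-- what changed: B first maps every node to a tagged candidate line and then removes duplicates by a select-and-remove loop (emit the head, filter its later copies out of the rest), with no seen-set state at all, instead of A's single stateful pass with two seen-sets.
import Mathlib
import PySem

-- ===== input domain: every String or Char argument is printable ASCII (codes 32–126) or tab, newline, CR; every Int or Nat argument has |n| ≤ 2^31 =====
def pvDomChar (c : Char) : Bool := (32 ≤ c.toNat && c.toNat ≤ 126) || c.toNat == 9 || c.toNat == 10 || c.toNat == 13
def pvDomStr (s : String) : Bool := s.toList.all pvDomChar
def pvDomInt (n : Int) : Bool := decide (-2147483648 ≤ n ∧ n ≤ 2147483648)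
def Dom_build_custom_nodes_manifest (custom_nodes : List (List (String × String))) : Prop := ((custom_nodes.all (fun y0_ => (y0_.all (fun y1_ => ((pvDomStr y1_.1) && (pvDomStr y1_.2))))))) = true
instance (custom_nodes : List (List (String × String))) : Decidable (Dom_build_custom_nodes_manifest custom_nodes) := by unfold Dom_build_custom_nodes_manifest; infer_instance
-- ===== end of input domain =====

-- B maps each node to one tagged candidate line, then removes duplicates by a select-and-remove
-- loop (emit the head, filter its later copies out of the rest) with no seen-set state;
-- objective: an alternative decomposition of the same task, not faster.

-- ===== PORT A =====
def pvHeader : List String :=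
  [ "# Auto-generated draft. Review unresolved items before delivery.",
    "# Supported formats:",
    "#   registry:<node-name>",
    "#   git:<repo-url>",
    "#   git:<repo-url>|<branch>" ]

-- one iteration of A's for-loop over (lines, seen_specs, seen_todos)
-- (node['node_name'] is total here via getD ""; Pre_ keeps the KeyError inputs out)
def pvStepA (st : List String × PySem.Set String × PySem.Set String)
    (node : List (String × String)) : List String × PySem.Set String × PySem.Set String :=
  let lines := st.1
  let seen_specs := st.2.1
  let seen_todos := st.2.2
  let install_spec := PySem.Dict.getD (PySem.Dict.ofList node) "install_spec" ""
  let version_hint := PySem.Dict.getD (PySem.Dict.ofList node) "version_hint" ""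
  if install_spec ≠ "" then
    let line := if version_hint ≠ "" then install_spec ++ "|" ++ version_hint else install_spec
    if PySem.Set.contains seen_specs line then st
    else (lines ++ [line], PySem.Set.add seen_specs line, seen_todos)
  else
    let todo := "# TODO unresolved custom node: " ++
      PySem.Dict.getD (PySem.Dict.ofList node) "node_name" ""
    if PySem.Set.contains seen_todos todo then st
    else (lines ++ [todo], seen_specs, PySem.Set.add seen_todos todo)

def build_custom_nodes_manifest (custom_nodes : List (List (String × String))) : String :=
  let st := custom_nodes.foldl pvStepA (pvHeader, PySem.Set.empty, PySem.Set.empty)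
  PySem.Str.join "\n" st.1 ++ "\n"

-- ===== PORT B =====
-- B's candidate(node): the single tagged line this node contributes
def pvCandidate (node : List (String × String)) : Bool × String :=
  let spec := PySem.Dict.getD (PySem.Dict.ofList node) "install_spec" ""
  if spec ≠ "" then
    let hint := PySem.Dict.getD (PySem.Dict.ofList node) "version_hint" ""
    (true, if hint ≠ "" then spec ++ "|" ++ hint else spec)
  else
    (false, "# TODO unresolved custom node: " ++
      PySem.Dict.getD (PySem.Dict.ofList node) "node_name" "")

-- B's while-loop: emit the head candidate's line, drop its later copies, repeat
def pvUnique : List (Bool × String) → List String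
  | [] => []
  | h :: t => h.2 :: pvUnique (t.filter (fun c => c ≠ h))
termination_by l => l.length
decreasing_by simpa using Nat.lt_succ_of_le (le_trans (List.length_filter_le _ _) (by simp))

def build_custom_nodes_manifest_alt (custom_nodes : List (List (String × String))) : String :=
  let cands := custom_nodes.map pvCandidate
  PySem.Str.join "\n" (pvHeader ++ pvUnique cands) ++ "\n"

-- ===== PRECONDITION & SPEC =====
-- Pre_ excludes exactly the inputs where A raises KeyError: a node whose "install_spec" is
-- missing or empty and which has no "node_name" key.
def Pre_build_custom_nodes_manifest (custom_nodes : List (List (String × String))) : Prop :=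
  ∀ node ∈ custom_nodes,
    PySem.Dict.getD (PySem.Dict.ofList node) "install_spec" "" ≠ "" ∨
    PySem.Dict.contains (PySem.Dict.ofList node) "node_name" = true
instance (custom_nodes : List (List (String × String))) : Decidable (Pre_build_custom_nodes_manifest custom_nodes) := by unfold Pre_build_custom_nodes_manifest; infer_instance

def pvWitness_build_custom_nodes_manifest : (List (List (String × String))) :=
  [ [("install_spec", "git:https://example.com/repo"), ("version_hint", "main")],
    [("node_name", "FooNode")],
    [("install_spec", "git:https://example.com/repo"), ("version_hint", "main")] ]

def Spec_build_custom_nodes_manifest (custom_nodes : List (List (String × String))) (out : String) : Prop := out = build_custom_nodes_manifest_alt custom_nodes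
instance (custom_nodes : List (List (String × String))) (out : String) : Decidable (Spec_build_custom_nodes_manifest custom_nodes out) := by unfold Spec_build_custom_nodes_manifest; infer_instance

-- ===== CLAIM (what is proved, stated in full; the proofs are below) =====
def Claim_equal_build_custom_nodes_manifest : Prop := ∀ (custom_nodes : List (List (String × String))), Dom_build_custom_nodes_manifest custom_nodes → Pre_build_custom_nodes_manifest custom_nodes → Spec_build_custom_nodes_manifest custom_nodes (build_custom_nodes_manifest custom_nodes)

-- ===== LEMMAS AND PROOFS =====

-- spec lines seen so far (tag true) / todo lines seen so far (tag false), read off one shared state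
def pvTrues (d : List (Bool × String)) : List String :=
  d.filterMap (fun p => if p.1 then some p.2 else none)
def pvFalses (d : List (Bool × String)) : List String :=
  d.filterMap (fun p => if p.1 then none else some p.2)

-- the lines A's loop emits beyond the tagged candidates already in d
def pvGo (d : List (Bool × String)) : List (Bool × String) → List String
  | [] => []
  | p :: ps => if PySem.Set.contains d p then pvGo d ps else p.2 :: pvGo (d ++ [p]) ps

theorem pvMem_trues (d : List (Bool × String)) (l : String) :
    l ∈ pvTrues d ↔ (true, l) ∈ d := by
  simp only [pvTrues, List.mem_filterMap]
  constructor
  · rintro ⟨⟨b, l'⟩, hm, h⟩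
    cases b <;> simp_all
  · intro h; exact ⟨(true, l), h, rfl⟩

theorem pvMem_falses (d : List (Bool × String)) (l : String) :
    l ∈ pvFalses d ↔ (false, l) ∈ d := by
  simp only [pvFalses, List.mem_filterMap]
  constructor
  · rintro ⟨⟨b, l'⟩, hm, h⟩
    cases b <;> simp_all
  · intro h; exact ⟨(false, l), h, rfl⟩

theorem pvTrues_append_true (d : List (Bool × String)) (l : String) :
    pvTrues (d ++ [(true, l)]) = pvTrues d ++ [l] := by
  simp [pvTrues]
theorem pvTrues_append_false (d : List (Bool × String)) (l : String) :
    pvTrues (d ++ [(false, l)]) = pvTrues d := by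
  simp [pvTrues]
theorem pvFalses_append_true (d : List (Bool × String)) (l : String) :
    pvFalses (d ++ [(true, l)]) = pvFalses d := by
  simp [pvFalses]
theorem pvFalses_append_false (d : List (Bool × String)) (l : String) :
    pvFalses (d ++ [(false, l)]) = pvFalses d ++ [l] := by
  simp [pvFalses]

-- A's loop from a state described by d produces exactly the lines pvGo d emits
theorem pvLoopA_eq (ns : List (List (String × String))) :
    ∀ (acc : List String) (d : List (Bool × String)),
    (ns.foldl pvStepA (acc, pvTrues d, pvFalses d)).1 = acc ++ pvGo d (ns.map pvCandidate) := by
  induction ns with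
  | nil => intro acc d; simp [pvGo]
  | cons n ns ih =>
    intro acc d
    simp only [List.foldl_cons, List.map_cons]
    by_cases hspec : PySem.Dict.getD (PySem.Dict.ofList n) "install_spec" "" ≠ ""
    · -- candidate is a spec line
      set hint := PySem.Dict.getD (PySem.Dict.ofList n) "version_hint" "" with hhint
      set line := (if hint ≠ "" then
          PySem.Dict.getD (PySem.Dict.ofList n) "install_spec" "" ++ "|" ++ hint
        else PySem.Dict.getD (PySem.Dict.ofList n) "install_spec" "") with hline
      have hcand : pvCandidate n = (true, line) := by
        simp only [pvCandidate]
        rw [if_pos hspec]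
      have hcontains : PySem.Set.contains (pvTrues d) line = PySem.Set.contains d (true, line) := by
        by_cases hm : (true, line) ∈ d
        · have h1 : line ∈ pvTrues d := (pvMem_trues d line).mpr hm
          simp [pysem, hm, h1]
        · have h1 : line ∉ pvTrues d := fun h => hm ((pvMem_trues d line).mp h)
          simp [pysem, hm, h1]
      have hstep : pvStepA (acc, pvTrues d, pvFalses d) n =
          if PySem.Set.contains d (true, line) then (acc, pvTrues d, pvFalses d)
          else (acc ++ [line], PySem.Set.add (pvTrues d) line, pvFalses d) := by
        simp only [pvStepA]
        rw [if_pos hspec, ← hhint, ← hline, hcontains]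
      rw [hstep, pvGo, hcand]
      by_cases hc : PySem.Set.contains d (true, line) = true
      · rw [if_pos hc, if_pos hc, ih]
      · rw [if_neg hc, if_neg hc]
        have hnm : (true, line) ∉ d := by
          intro hm
          exact hc (by simp [pysem, hm])
        have hnl : line ∉ pvTrues d := fun h => hnm ((pvMem_trues d line).mp h)
        have hadd : PySem.Set.add (pvTrues d) line = pvTrues (d ++ [(true, line)]) := by
          rw [pvTrues_append_true]
          exact PySem.Set.add_of_not_mem hnl
        have hfa : pvFalses d = pvFalses (d ++ [(true, line)]) := (pvFalses_append_true d line).symm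
        rw [hadd, hfa, ih]
        simp
    · -- candidate is a TODO line
      set todo := "# TODO unresolved custom node: " ++
        PySem.Dict.getD (PySem.Dict.ofList n) "node_name" "" with htodo
      have hcand : pvCandidate n = (false, todo) := by
        simp only [pvCandidate]
        rw [if_neg hspec]
      have hcontains : PySem.Set.contains (pvFalses d) todo = PySem.Set.contains d (false, todo) := by
        by_cases hm : (false, todo) ∈ d
        · have h1 : todo ∈ pvFalses d := (pvMem_falses d todo).mpr hm
          simp [pysem, hm, h1]
        · have h1 : todo ∉ pvFalses d := fun h => hm ((pvMem_falses d todo).mp h)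
          simp [pysem, hm, h1]
      have hstep : pvStepA (acc, pvTrues d, pvFalses d) n =
          if PySem.Set.contains d (false, todo) then (acc, pvTrues d, pvFalses d)
          else (acc ++ [todo], pvTrues d, PySem.Set.add (pvFalses d) todo) := by
        simp only [pvStepA]
        rw [if_neg hspec, ← htodo, hcontains]
      rw [hstep, pvGo, hcand]
      by_cases hc : PySem.Set.contains d (false, todo) = true
      · rw [if_pos hc, if_pos hc, ih]
      · rw [if_neg hc, if_neg hc]
        have hnm : (false, todo) ∉ d := by
          intro hm
          exact hc (by simp [pysem, hm])
        have hnl : todo ∉ pvFalses d := fun h => hnm ((pvMem_falses d todo).mp h)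
        have hadd : PySem.Set.add (pvFalses d) todo = pvFalses (d ++ [(false, todo)]) := by
          rw [pvFalses_append_false]
          exact PySem.Set.add_of_not_mem hnl
        have htr : pvTrues d = pvTrues (d ++ [(false, todo)]) := (pvTrues_append_false d todo).symm
        rw [hadd, htr, ih]
        simp

-- A's emission (pvGo from state d) is B's select-and-remove loop on the not-yet-seen candidates
theorem pvGo_eq_unique (ps : List (Bool × String)) :
    ∀ d, pvGo d ps = pvUnique (ps.filter (fun c => !PySem.Set.contains d c)) := by
  induction ps with
  | nil => intro d; rw [pvGo]; simp; rw [pvUnique]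
  | cons p ps ih =>
    intro d
    rw [pvGo]
    by_cases hc : PySem.Set.contains d p = true
    · rw [if_pos hc, List.filter_cons_of_neg (by simpa [pysem] using hc), ih]
    · rw [if_neg hc, List.filter_cons_of_pos (by simpa [pysem] using hc)]
      rw [pvUnique, ih (d ++ [p]), List.filter_filter]
      have hfe : ∀ c ∈ ps, (!PySem.Set.contains (d ++ [p]) c)
          = (decide (c ≠ p) && !PySem.Set.contains d c) := by
        intro c _
        by_cases hcp : c = p <;> simp [pysem, hcp]
      rw [List.filter_congr hfe]

-- ===== VERDICT (by name: the statement is the Claim_ definition above) =====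
theorem build_custom_nodes_manifest_spec : Claim_equal_build_custom_nodes_manifest := by
  intro custom_nodes _ _
  unfold Spec_build_custom_nodes_manifest
  unfold build_custom_nodes_manifest build_custom_nodes_manifest_alt
  have hA : (custom_nodes.foldl pvStepA (pvHeader, PySem.Set.empty, PySem.Set.empty)).1
      = pvHeader ++ pvGo [] (custom_nodes.map pvCandidate) := by
    have h0 : (PySem.Set.empty : PySem.Set String) = pvTrues [] := rfl
    have h1 : (PySem.Set.empty : PySem.Set String) = pvFalses [] := rfl
    calc (custom_nodes.foldl pvStepA (pvHeader, PySem.Set.empty, PySem.Set.empty)).1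
        = (custom_nodes.foldl pvStepA (pvHeader, pvTrues [], pvFalses [])).1 := by rw [← h0, ← h1]
      _ = pvHeader ++ pvGo [] (custom_nodes.map pvCandidate) := pvLoopA_eq custom_nodes pvHeader []
  have hB : pvGo [] (custom_nodes.map pvCandidate) = pvUnique (custom_nodes.map pvCandidate) := by
    rw [pvGo_eq_unique]
    congr 1
    simp [pysem]
  simp only [hA, hB]
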